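-- pv_equiv track=rewrite | github.com/Dima-dev-front/AI-NEWS | bot.py | get_next_category_feeds
-- ===== SOURCE A (Python) =====
-- from typing import Set, Tuple, Optional, Dict, List
--
-- def get_next_category_feeds(categories: Dict[str, List[str]], last_category: Optional[str] = None) -> Tuple[str, List[str]]:
-- 	"""Get feeds from next category in rotation."""
-- 	if not categories:
-- 		return "TECH_ENGINEERING", []
--
-- 	category_order = ["AI_ML", "SPACE_NASA", "SCIENCE", "TECH_ENGINEERING", "AUTO_EV", "DEFENSE", "BIOTECH_MEDICINE", "GITHUB"]
-- 	available_categories = [cat for cat in category_order if cat in categories]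
--
-- 	if not available_categories:
-- 		return list(categories.keys())[0], list(categories.values())[0]
--
-- 	if last_category is None or last_category not in available_categories:
-- 		return available_categories[0], categories[available_categories[0]]
--
-- 	# Найти следующую категорию
-- 	try:
-- 		current_idx = available_categories.index(last_category)
-- 		next_idx = (current_idx + 1) % len(available_categories)
-- 		next_category = available_categories[next_idx]
-- 		return next_category, categories[next_category]
-- 	except ValueError:
-- 		return available_categories[0], categories[available_categories[0]]
-- ===== SOURCE B (Python) =====
-- def get_next_category_feeds(categories, last_category=None):
--     """Get feeds from next category in rotation (single cyclic scan over the fixed order)."""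
--     if not categories:
--         return "TECH_ENGINEERING", []
--     order = ["AI_ML", "SPACE_NASA", "SCIENCE", "TECH_ENGINEERING", "AUTO_EV", "DEFENSE", "BIOTECH_MEDICINE", "GITHUB"]
--     start = 0
--     if last_category is not None and last_category in categories and last_category in order:
--         start = order.index(last_category) + 1
--     for cat in order[start:] + order[:start]:
--         if cat in categories:
--             return cat, categories[cat]
--     return next(iter(categories.items()))
-- ===== Notes on version B (the rewrite author's own statement) =====
-- stated objective: simpler
-- what changed: Replaced A's filtered-available-list plus index/modulo arithmetic (and its unreachable try/except) by one cyclic scan of the fixed category order starting one past last_category, returning the first category present in the dict.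
import Mathlib
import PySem

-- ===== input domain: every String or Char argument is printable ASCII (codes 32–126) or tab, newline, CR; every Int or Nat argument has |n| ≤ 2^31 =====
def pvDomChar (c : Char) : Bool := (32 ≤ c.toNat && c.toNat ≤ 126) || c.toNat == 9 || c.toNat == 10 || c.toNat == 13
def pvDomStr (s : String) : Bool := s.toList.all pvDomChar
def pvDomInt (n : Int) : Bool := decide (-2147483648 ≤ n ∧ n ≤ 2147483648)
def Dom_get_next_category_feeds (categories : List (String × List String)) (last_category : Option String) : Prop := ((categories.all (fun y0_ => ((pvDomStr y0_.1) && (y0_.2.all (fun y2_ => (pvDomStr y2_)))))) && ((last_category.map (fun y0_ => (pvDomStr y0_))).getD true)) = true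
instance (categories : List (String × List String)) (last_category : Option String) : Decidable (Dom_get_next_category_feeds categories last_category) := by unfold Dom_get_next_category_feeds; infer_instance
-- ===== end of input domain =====

-- B replaces A's filtered-list / index / modulo arithmetic by a single cyclic scan of the
-- fixed category order starting one past last_category (objective: simpler decomposition).

-- ===== PORT A =====
-- the fixed rotation order (shared module constant of both programs)
def pvOrder : List String :=
  ["AI_ML", "SPACE_NASA", "SCIENCE", "TECH_ENGINEERING", "AUTO_EV", "DEFENSE", "BIOTECH_MEDICINE", "GITHUB"]

-- 'k in categories' on the dict (assoc list, first match)
def pvHasKey (categories : List (String × List String)) (k : String) : Bool :=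
  categories.any (fun p => p.1 == k)

-- 'categories[k]' — only used where the key is present
def pvLookup (categories : List (String × List String)) (k : String) : List String :=
  ((categories.find? (fun p => p.1 == k)).map (·.2)).getD []

def get_next_category_feeds (categories : List (String × List String)) (last_category : Option String) : String × List String :=
  if categories.isEmpty then ("TECH_ENGINEERING", [])
  else
    let available := pvOrder.filter (fun c => pvHasKey categories c)
    if available.isEmpty then
      ((categories.map (·.1)).headD "", (categories.map (·.2)).headD [])
    else
      match last_category with
      | none =>
          (PySem.List.pyGetD available 0 "", pvLookup categories (PySem.List.pyGetD available 0 ""))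
      | some lc =>
          if available.contains lc then
            -- try: current_idx = available.index(lc) …  (except ValueError unreachable)
            match PySem.List.index? available lc with
            | some i =>
                let nxt := PySem.List.pyGetD available (PySem.Int.mod ((i : Int) + 1) (available.length : Int)) ""
                (nxt, pvLookup categories nxt)
            | none =>
                (PySem.List.pyGetD available 0 "", pvLookup categories (PySem.List.pyGetD available 0 ""))
          else
            (PySem.List.pyGetD available 0 "", pvLookup categories (PySem.List.pyGetD available 0 ""))

-- ===== PORT B =====
def get_next_category_feeds_alt (categories : List (String × List String)) (last_category : Option String) : String × List String :=
  if categories.isEmpty then ("TECH_ENGINEERING", [])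
  else
    let start : Nat :=
      match last_category with
      | none => 0
      | some lc =>
          if pvHasKey categories lc then
            match PySem.List.index? pvOrder lc with
            | some j => j + 1
            | none => 0
          else 0
    -- for cat in order[start:] + order[:start]: if cat in categories: return cat, categories[cat]
    match (PySem.List.slice pvOrder (some (start : Int)) none
            ++ PySem.List.slice pvOrder none (some (start : Int))).find? (fun c => pvHasKey categories c) with
    | some cat => (cat, pvLookup categories cat)
    | none => ((categories.headD ("", [])).1, (categories.headD ("", [])).2)

-- ===== PRECONDITION & SPEC =====
def Spec_get_next_category_feeds (categories : List (String × List String)) (last_category : Option String) (out : String × List String) : Prop := out = get_next_category_feeds_alt categories last_category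
instance (categories : List (String × List String)) (last_category : Option String) (out : String × List String) : Decidable (Spec_get_next_category_feeds categories last_category out) := by unfold Spec_get_next_category_feeds; infer_instance

-- ===== CLAIM (what is proved, stated in full; the proofs are below) =====
def Claim_equal_get_next_category_feeds : Prop := ∀ (categories : List (String × List String)) (last_category : Option String), Dom_get_next_category_feeds categories last_category → Spec_get_next_category_feeds categories last_category (get_next_category_feeds categories last_category)

-- ===== LEMMAS AND PROOFS =====

-- A's ((i+1) % len)-step inside 'avail = X ++ lc :: Y' is the head of the rotation 'Y ++ (X ++ [lc])'
lemma pv_pyGetD_rot (X Y : List String) (lc d : String) :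
    PySem.List.pyGetD (X ++ lc :: Y)
      (PySem.Int.mod ((X.length : Int) + 1) (((X ++ lc :: Y).length : Int)) ) d
      = (Y ++ (X ++ [lc])).headD d := by
  cases Y with
  | nil =>
      have h1 : ((X.length : Int) + 1) = ((X.length + 1 : Nat) : Int) := by push_cast; ring
      rw [h1]
      rw [show ((X ++ [lc] : List String).length : Int) = ((X.length + 1 : Nat) : Int) from by simp,
        PySem.Int.mod_natCast, Nat.mod_self, PySem.List.pyGetD_natCast]
      cases X <;> simp [List.getD, List.headD]
  | cons y Y' =>
      have hlt : X.length + 1 < (X ++ lc :: y :: Y').length := by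
        simp only [List.length_append, List.length_cons]; omega
      have h1 : ((X.length : Int) + 1) = ((X.length + 1 : Nat) : Int) := by push_cast; ring
      rw [h1, PySem.Int.mod_natCast, Nat.mod_eq_of_lt hlt, PySem.List.pyGetD_natCast]
      rw [List.getD_eq_getElem?_getD, List.getElem?_append_right (by omega)]
      simp

-- find? over any sublist region of a list whose filter is empty is none
lemma pv_find?_eq_none_of_filter_nil (P : String → Bool) (L M : List String)
    (hsub : ∀ x ∈ M, x ∈ L) (hfil : L.filter P = []) : M.find? P = none := by
  rw [List.find?_eq_none]
  intro x hx
  have := List.filter_eq_nil_iff.mp hfil x (hsub x hx)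
  simpa using this

-- find? of the first present category is the head of the filtered list
lemma pv_find?_first (P : String → Bool) (L : List String) (h : L.filter P ≠ []) :
    L.find? P = some (PySem.List.pyGetD (L.filter P) 0 "") := by
  rw [← List.head?_filter]
  cases hf : L.filter P with
  | nil => exact absurd hf h
  | cons a t => simp [PySem.List.pyGetD_zero_cons]

-- B's cyclic scan from one past lc returns exactly A's avail[(idx+1) % len]
lemma pv_rot_main (P : String → Bool) (pre suf : List String) (lc : String)
    (hlc : P lc = true) :
    (suf ++ (pre ++ [lc])).find? P
      = some (PySem.List.pyGetD ((pre ++ lc :: suf).filter P)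
          (PySem.Int.mod (((pre.filter P).length : Int) + 1)
            ((((pre ++ lc :: suf).filter P).length : Int))) "") := by
  have hfil : (pre ++ lc :: suf).filter P = pre.filter P ++ lc :: suf.filter P := by
    simp [List.filter_append, hlc]
  rw [hfil, pv_pyGetD_rot, ← List.head?_filter]
  have h2 : (suf ++ (pre ++ [lc])).filter P = suf.filter P ++ (pre.filter P ++ [lc]) := by
    simp [List.filter_append, hlc]
  rw [h2]
  have hne : suf.filter P ++ (pre.filter P ++ [lc]) ≠ [] := by simp
  obtain ⟨a, t, h3⟩ := List.exists_cons_of_ne_nil hne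
  rw [h3]; simp

-- ===== VERDICT (by name: the statement is the Claim_ definition above) =====
theorem get_next_category_feeds_spec : Claim_equal_get_next_category_feeds := by
  intro categories last_category _
  unfold Spec_get_next_category_feeds
  cases categories with
  | nil => rfl
  | cons c cs =>
    unfold get_next_category_feeds get_next_category_feeds_alt
    by_cases hfil : pvOrder.filter (fun x => pvHasKey (c :: cs) x) = []
    · -- no category of the fixed order is present: both fall back to the first dict entry
      have hB : ∀ (s : Nat),
          (PySem.List.slice pvOrder (some (s : Int)) none
            ++ PySem.List.slice pvOrder none (some (s : Int))).find?
              (fun x => pvHasKey (c :: cs) x) = none := by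
        intro s
        refine pv_find?_eq_none_of_filter_nil _ pvOrder _ ?_ hfil
        intro x hx
        rcases List.mem_append.mp hx with h | h
        · exact PySem.List.mem_of_mem_slice _ _ _ h
        · exact PySem.List.mem_of_mem_slice _ _ _ h
      simp only [List.isEmpty_cons, Bool.false_eq_true, if_false, hfil, List.isEmpty_nil,
        if_true, hB]
      cases last_category <;> simp
    · have hAne : (pvOrder.filter (fun x => pvHasKey (c :: cs) x)).isEmpty = false := by
        simpa [List.isEmpty_iff] using hfil
      have hfirst := pv_find?_first (fun x => pvHasKey (c :: cs) x) pvOrder hfil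
      cases last_category with
      | none =>
        simp only [List.isEmpty_cons, Bool.false_eq_true, if_false, hAne]
        rw [show PySem.List.slice pvOrder (some ((0 : Nat) : Int)) none
              ++ PySem.List.slice pvOrder none (some ((0 : Nat) : Int)) = pvOrder from rfl,
          hfirst]
      | some lc =>
        simp only [List.isEmpty_cons, Bool.false_eq_true, if_false, hAne]
        by_cases hk : pvHasKey (c :: cs) lc
        · cases hidx : PySem.List.index? pvOrder lc with
          | none =>
            have hnotmem : lc ∉ pvOrder := (PySem.List.index?_eq_none_iff pvOrder lc).mp hidx
            have hcont : (pvOrder.filter (fun x => pvHasKey (c :: cs) x)).contains lc = false := by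
              simp only [List.contains_eq_mem, decide_eq_false_iff_not]
              exact fun h => hnotmem (List.mem_of_mem_filter h)
            simp only [hk, if_true, hcont, Bool.false_eq_true, if_false]
            rw [show PySem.List.slice pvOrder (some ((0 : Nat) : Int)) none
                  ++ PySem.List.slice pvOrder none (some ((0 : Nat) : Int)) = pvOrder from rfl,
              hfirst]
          | some j =>
            obtain ⟨pre, suf, hLo, hlen, hnotin⟩ := (PySem.List.index?_eq_some_iff pvOrder lc j).mp hidx
            have hPlc : pvHasKey (c :: cs) lc = true := hk
            have hAv : pvOrder.filter (fun x => pvHasKey (c :: cs) x)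
                = pre.filter (fun x => pvHasKey (c :: cs) x)
                  ++ lc :: suf.filter (fun x => pvHasKey (c :: cs) x) := by
              rw [hLo]; simp [List.filter_append, hPlc]
            have hcont : (pvOrder.filter (fun x => pvHasKey (c :: cs) x)).contains lc = true := by
              rw [hAv]; simp [List.contains_eq_mem]
            have hidxA : PySem.List.index? (pvOrder.filter (fun x => pvHasKey (c :: cs) x)) lc
                = some (pre.filter (fun x => pvHasKey (c :: cs) x)).length := by
              rw [hAv]
              exact (PySem.List.index?_eq_some_iff _ _ _).mpr
                ⟨_, _, rfl, rfl, fun h => hnotin (List.mem_of_mem_filter h)⟩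
            have hslice : PySem.List.slice pvOrder (some ((j + 1 : Nat) : Int)) none
                ++ PySem.List.slice pvOrder none (some ((j + 1 : Nat) : Int))
                = suf ++ (pre ++ [lc]) := by
              rw [PySem.List.slice_from_natCast, PySem.List.slice_to_natCast, hLo]
              rw [show pre ++ lc :: suf = (pre ++ [lc]) ++ suf from by simp, ← hlen,
                show pre.length + 1 = (pre ++ [lc]).length from by simp]
              rw [List.drop_left, List.take_left]
            have hrot := pv_rot_main (fun x => pvHasKey (c :: cs) x) pre suf lc hPlc
            rw [← hLo] at hrot
            simp only [hk, if_true, hcont, hidxA, hslice, hrot]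
        · have hk' : pvHasKey (c :: cs) lc = false := by simpa using hk
          have hcont : (pvOrder.filter (fun x => pvHasKey (c :: cs) x)).contains lc = false := by
            simp only [List.contains_eq_mem, decide_eq_false_iff_not]
            intro h
            exact hk (by simpa using (List.mem_filter.mp h).2)
          simp only [hk', Bool.false_eq_true, if_false, hcont]
          rw [show PySem.List.slice pvOrder (some ((0 : Nat) : Int)) none
                ++ PySem.List.slice pvOrder none (some ((0 : Nat) : Int)) = pvOrder from rfl,
            hfirst]
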